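-- pv_equiv track=rewrite | github.com/sahilkhan123/Cyclone | stabilizer_parser.py | greedy_parallel_schedule
-- ===== SOURCE A (Python) =====
-- def greedy_parallel_schedule(task_lists):
--     schedule = []  # List of parallel batches, each is a list of task indices
--     task_sets = [set(task) for task in task_lists]
--
--     for i, task in enumerate(task_sets):
--         placed = False
--         for batch in schedule:
--             # Check if task conflicts with any task in this batch
--             if all(task.isdisjoint(task_sets[j]) for j in batch):
--                 batch.append(i)
--                 placed = True
--                 break
--         if not placed:
--             schedule.append([i])
--
--     # Total time = sum of max lengths of tasks per time slot
--     total_time = sum(max(len(task_lists[i]) for i in batch) for batch in schedule)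
--
--     return schedule, total_time
-- ===== SOURCE B (Python) =====
-- def greedy_parallel_schedule(task_lists):
--     # First-fit into batches, but each batch keeps a running union of its
--     # members' elements and a running max task length, so placement tests one
--     # set instead of scanning every member, and no second pass is needed.
--     batches = []  # each entry: [indices, union_of_elements, max_task_len]
--     for i, task in enumerate(task_lists):
--         t = set(task)
--         n = len(task)
--         for b in batches:
--             if t.isdisjoint(b[1]):
--                 b[0].append(i)
--                 b[1] |= t
--                 if n > b[2]:
--                     b[2] = n
--                 break
--         else:
--             batches.append([[i], t, n])
--     return [b[0] for b in batches], sum(b[2] for b in batches)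
-- ===== Notes on version B (the rewrite author's own statement) =====
-- stated objective: faster
-- what changed: Each batch maintains a running union of its members' elements and a running max length, so a placement test is one isdisjoint against the union instead of a scan over every member set, and the final total-time pass disappears.
import Mathlib
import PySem

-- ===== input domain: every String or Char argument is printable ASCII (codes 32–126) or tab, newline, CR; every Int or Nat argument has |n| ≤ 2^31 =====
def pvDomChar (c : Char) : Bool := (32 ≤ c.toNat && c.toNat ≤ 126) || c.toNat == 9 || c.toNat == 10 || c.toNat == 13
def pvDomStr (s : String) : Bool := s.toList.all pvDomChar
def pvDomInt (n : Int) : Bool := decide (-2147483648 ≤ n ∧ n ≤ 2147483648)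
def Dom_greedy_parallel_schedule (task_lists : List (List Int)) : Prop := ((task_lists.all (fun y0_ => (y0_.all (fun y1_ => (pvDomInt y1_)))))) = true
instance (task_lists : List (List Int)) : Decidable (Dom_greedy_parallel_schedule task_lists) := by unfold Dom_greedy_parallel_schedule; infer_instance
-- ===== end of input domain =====

-- B replaces A's per-member disjointness scan and second max pass by a running
-- union set and running max length per batch (objective: faster placement test).

-- ===== PORT A =====
-- inner 'for batch in schedule: … break': place the index into the first batch
-- whose every member j has task_sets[j] disjoint from the task; none = not placed
def pvPlaceA (ts : List (PySem.Set Int)) (t : PySem.Set Int) (i : Int) :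
    List (List Int) → Option (List (List Int))
  | [] => none
  | b :: rest =>
    if b.all (fun j => PySem.Set.isdisjoint t (PySem.List.pyGetD ts j PySem.Set.empty)) then
      some ((b ++ [i]) :: rest)
    else (pvPlaceA ts t i rest).map (b :: ·)

-- max(len(task_lists[i]) for i in batch); batches are never empty so the
-- .getD 0 default (Python's ValueError on an empty max) is unreachable
def pvMaxLen (task_lists : List (List Int)) (batch : List Int) : Int :=
  (PySem.List.max? (batch.map (fun j => ((PySem.List.pyGetD task_lists j []).length : Int)))
    (fun x => x)).getD 0

def greedy_parallel_schedule (task_lists : List (List Int)) : List (List Int) × Int :=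
  let task_sets := task_lists.map (fun t => PySem.Set.ofList t)
  let schedule := (PySem.List.enumerate task_sets 0).foldl
    (fun sch p =>
      match pvPlaceA task_sets p.2 p.1 sch with
      | some sch' => sch'
      | none => sch ++ [[p.1]]) []
  (schedule, (schedule.map (pvMaxLen task_lists)).sum)

-- ===== PORT B =====
-- inner 'for b in batches: … break': each batch is (indices, union set, max len)
def pvPlaceB (t : PySem.Set Int) (i n : Int) :
    List (List Int × PySem.Set Int × Int) → Option (List (List Int × PySem.Set Int × Int))
  | [] => none
  | b :: rest =>
    if PySem.Set.isdisjoint t b.2.1 then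
      some ((b.1 ++ [i], PySem.Set.union b.2.1 t, if n > b.2.2 then n else b.2.2) :: rest)
    else (pvPlaceB t i n rest).map (b :: ·)

def greedy_parallel_schedule_alt (task_lists : List (List Int)) : List (List Int) × Int :=
  let batches := (PySem.List.enumerate task_lists 0).foldl
    (fun bs p =>
      let t := PySem.Set.ofList p.2
      let n : Int := (p.2.length : Int)
      match pvPlaceB t p.1 n bs with
      | some bs' => bs'
      | none => bs ++ [([p.1], t, n)]) []
  (batches.map (fun b => b.1), (batches.map (fun b => b.2.2)).sum)

-- ===== PRECONDITION & SPEC =====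
def Spec_greedy_parallel_schedule (task_lists : List (List Int)) (out : List (List Int) × Int) : Prop := out = greedy_parallel_schedule_alt task_lists
instance (task_lists : List (List Int)) (out : List (List Int) × Int) : Decidable (Spec_greedy_parallel_schedule task_lists out) := by unfold Spec_greedy_parallel_schedule; infer_instance

-- ===== CLAIM (what is proved, stated in full; the proofs are below) =====
def Claim_equal_greedy_parallel_schedule : Prop := ∀ (task_lists : List (List Int)), Dom_greedy_parallel_schedule task_lists → Spec_greedy_parallel_schedule task_lists (greedy_parallel_schedule task_lists)

-- ===== LEMMAS AND PROOFS =====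

-- length of task_lists[j], as A's max pass reads it
def pvLenF (task_lists : List (List Int)) (j : Int) : Int :=
  ((PySem.List.pyGetD task_lists j []).length : Int)

-- invariant tying one of B's triples to A's view of that batch:
-- the union set has exactly the elements of the members' task sets, and the
-- stored max is the running max of the members' lengths (batch nonempty)
def pvRep (task_lists : List (List Int)) (b : List Int × PySem.Set Int × Int) : Prop :=
  (∀ x : Int, x ∈ b.2.1 ↔ ∃ j ∈ b.1,
      x ∈ (PySem.List.pyGetD (task_lists.map (fun t => PySem.Set.ofList t)) j PySem.Set.empty : List Int)) ∧
  (∃ j rest, b.1 = j :: rest ∧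
      b.2.2 = rest.foldl (fun a j' => max a (pvLenF task_lists j')) (pvLenF task_lists j))

lemma pv_test_agree (tl : List (List Int)) (t : PySem.Set Int)
    (b : List Int × PySem.Set Int × Int) (hb : pvRep tl b) :
    (b.1.all (fun j => PySem.Set.isdisjoint t
        (PySem.List.pyGetD (tl.map (fun l => PySem.Set.ofList l)) j PySem.Set.empty)))
      = PySem.Set.isdisjoint t b.2.1 := by
  rw [Bool.eq_iff_iff]
  simp only [List.all_eq_true, PySem.Set.isdisjoint_iff]
  constructor
  · intro h x hx hmem
    rcases (hb.1 x).mp hmem with ⟨j, hj, hxj⟩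
    exact h j hj x hx hxj
  · intro h j hj x hx hxj
    exact h x hx ((hb.1 x).mpr ⟨j, hj, hxj⟩)

lemma pv_place_agree (tl : List (List Int)) (task : List Int) (i : Int)
    (hset : PySem.List.pyGetD (tl.map (fun l => PySem.Set.ofList l)) i PySem.Set.empty
              = PySem.Set.ofList task)
    (hlen : pvLenF tl i = (task.length : Int)) :
    ∀ (bs : List (List Int × PySem.Set Int × Int)), (∀ b ∈ bs, pvRep tl b) →
      pvPlaceA (tl.map (fun l => PySem.Set.ofList l)) (PySem.Set.ofList task) i (bs.map (fun b => b.1))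
        = (pvPlaceB (PySem.Set.ofList task) i (task.length : Int) bs).map (List.map (fun b => b.1)) ∧
      ∀ bs', pvPlaceB (PySem.Set.ofList task) i (task.length : Int) bs = some bs' →
        ∀ b ∈ bs', pvRep tl b := by
  intro bs
  induction bs with
  | nil => intro _; exact ⟨rfl, by intro bs' h; cases h⟩
  | cons b rest ih =>
    intro hrep
    have hb := hrep b (by simp)
    have hrest := ih (fun b' hb' => hrep b' (by simp [hb']))
    rw [List.map_cons]
    simp only [pvPlaceA, pvPlaceB, pv_test_agree tl (PySem.Set.ofList task) b hb]
    by_cases hd : PySem.Set.isdisjoint (PySem.Set.ofList task) b.2.1 = true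
    · simp only [hd, if_true]
      refine ⟨rfl, ?_⟩
      intro bs' h
      injection h with h; subst h
      intro b' hb'
      rcases List.mem_cons.mp hb' with h' | h'
      · subst h'
        constructor
        · intro x
          simp only [PySem.Set.mem_union, hb.1 x]
          constructor
          · rintro (⟨j, hj, hxj⟩ | hx)
            · exact ⟨j, by simp [hj], hxj⟩
            · exact ⟨i, by simp, by rw [hset]; exact hx⟩
          · rintro ⟨j, hj, hxj⟩
            rcases List.mem_append.mp hj with hj | hj
            · exact Or.inl ⟨j, hj, hxj⟩
            · simp only [List.mem_singleton] at hj
              subst hj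
              rw [hset] at hxj
              exact Or.inr hxj
        · rcases hb.2 with ⟨j, r, hb1, hb2⟩
          refine ⟨j, r ++ [i], by rw [hb1]; simp, ?_⟩
          rw [List.foldl_append, ← hb2]
          simp only [List.foldl_cons, List.foldl_nil, hlen]
          split_ifs with h
          · exact (max_eq_right (by omega)).symm
          · exact (max_eq_left (by omega)).symm
      · exact hrep b' (by simp [h'])
    · simp only [Bool.not_eq_true] at hd
      simp only [hd, Bool.false_eq_true, if_false]
      refine ⟨?_, ?_⟩
      · rw [hrest.1]
        cases pvPlaceB (PySem.Set.ofList task) i (task.length : Int) rest <;> simp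
      · intro bs' h
        cases hpb : pvPlaceB (PySem.Set.ofList task) i (task.length : Int) rest with
        | none => rw [hpb] at h; cases h
        | some rest' =>
          rw [hpb] at h
          injection h with h; subst h
          intro b' hb'
          rcases List.mem_cons.mp hb' with h' | h'
          · subst h'; exact hb
          · exact hrest.2 rest' hpb b' h'

-- enumerate over a mapped list
lemma pv_enumerate_map {α β : Type} (f : α → β) (xs : List α) (s : Int) :
    PySem.List.enumerate (xs.map f) s
      = (PySem.List.enumerate xs s).map (fun p => (p.1, f p.2)) := by
  induction xs generalizing s with
  | nil => simp [PySem.List.enumerate_nil]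
  | cons x xs ih => simp [PySem.List.enumerate_cons, ih]

lemma pv_main (tl : List (List Int)) :
    ∀ (e : List (Int × List Int)) (bs : List (List Int × PySem.Set Int × Int)),
      (∀ p ∈ e, PySem.List.pyGetD tl p.1 [] = p.2 ∧ ∃ k : Nat, p.1 = (k : Int) ∧ k < tl.length) →
      (∀ b ∈ bs, pvRep tl b) →
      (e.foldl (fun sch p =>
          match pvPlaceA (tl.map (fun l => PySem.Set.ofList l)) (PySem.Set.ofList p.2) p.1 sch with
          | some sch' => sch'
          | none => sch ++ [[p.1]]) (bs.map (fun b => b.1)))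
        = (e.foldl (fun bs' p =>
          match pvPlaceB (PySem.Set.ofList p.2) p.1 (p.2.length : Int) bs' with
          | some bs'' => bs''
          | none => bs' ++ [([p.1], PySem.Set.ofList p.2, (p.2.length : Int))]) bs).map (fun b => b.1) ∧
      ∀ b ∈ (e.foldl (fun bs' p =>
          match pvPlaceB (PySem.Set.ofList p.2) p.1 (p.2.length : Int) bs' with
          | some bs'' => bs''
          | none => bs' ++ [([p.1], PySem.Set.ofList p.2, (p.2.length : Int))]) bs), pvRep tl b := by
  intro e
  induction e with
  | nil => intro bs _ hrep; exact ⟨rfl, hrep⟩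
  | cons p e ih =>
    intro bs he hrep
    obtain ⟨hget, k, hk, hklt⟩ := he p (by simp)
    have hset : PySem.List.pyGetD (tl.map (fun l => PySem.Set.ofList l)) p.1 PySem.Set.empty
        = PySem.Set.ofList p.2 := by
      have : PySem.Set.ofList ([] : List Int) = PySem.Set.empty := rfl
      rw [← hget, ← this, PySem.List.pyGetD_map]
    have hlen : pvLenF tl p.1 = (p.2.length : Int) := by
      unfold pvLenF; rw [hget]
    obtain ⟨hpa, hpb⟩ := pv_place_agree tl p.2 p.1 hset hlen bs hrep
    simp only [List.foldl_cons]
    cases hcase : pvPlaceB (PySem.Set.ofList p.2) p.1 (p.2.length : Int) bs with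
    | some bs' =>
      rw [hcase] at hpa
      simp only [Option.map_some] at hpa
      rw [hpa]
      exact ih bs' (fun q hq => he q (by simp [hq])) (hpb bs' hcase)
    | none =>
      rw [hcase] at hpa
      simp only [Option.map_none] at hpa
      rw [hpa]
      have hnew : ∀ b ∈ bs ++ [([p.1], PySem.Set.ofList p.2, (p.2.length : Int))], pvRep tl b := by
        intro b hb
        rcases List.mem_append.mp hb with h | h
        · exact hrep b h
        · simp only [List.mem_singleton] at h
          subst h
          constructor
          · intro x
            constructor
            · intro hx; exact ⟨p.1, by simp, by rw [hset]; exact hx⟩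
            · rintro ⟨j, hj, hxj⟩
              simp only [List.mem_singleton] at hj
              subst hj
              rw [hset] at hxj
              exact hxj
          · exact ⟨p.1, [], rfl, by simp [hlen]⟩
      have := ih (bs ++ [([p.1], PySem.Set.ofList p.2, (p.2.length : Int))])
        (fun q hq => he q (by simp [hq])) hnew
      refine ⟨?_, this.2⟩
      rw [← this.1]
      simp

lemma pv_maxlen_of_rep (tl : List (List Int)) (b : List Int × PySem.Set Int × Int)
    (hb : pvRep tl b) : pvMaxLen tl b.1 = b.2.2 := by
  rcases hb.2 with ⟨j, rest, h1, h2⟩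
  unfold pvMaxLen
  rw [h1, h2, List.map_cons, PySem.List.max?_id_cons, Option.getD_some, List.foldl_map]
  simp only [pvLenF]

-- ===== VERDICT (by name: the statement is the Claim_ definition above) =====
theorem greedy_parallel_schedule_spec : Claim_equal_greedy_parallel_schedule := by
  intro tl _
  unfold Spec_greedy_parallel_schedule greedy_parallel_schedule greedy_parallel_schedule_alt
  dsimp only
  have he : ∀ p ∈ PySem.List.enumerate tl 0,
      PySem.List.pyGetD tl p.1 [] = p.2 ∧ ∃ k : Nat, p.1 = (k : Int) ∧ k < tl.length := by
    intro p hp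
    rcases (PySem.List.mem_enumerate_iff tl 0 p).mp hp with ⟨k, hk, hpk⟩
    subst hpk
    refine ⟨?_, k, by simp, hk⟩
    simp [PySem.List.pyGetD_natCast, List.getD_eq_getElem?_getD, hk]
  have hmain := pv_main tl (PySem.List.enumerate tl 0) [] he (by intro b hb; cases hb)
  simp only [List.map_nil] at hmain
  simp only [pv_enumerate_map, List.foldl_map]
  rw [hmain.1]
  refine Prod.ext rfl ?_
  simp only [List.map_map]
  congr 1
  apply List.map_congr_left
  intro b hb
  exact pv_maxlen_of_rep tl b (hmain.2 b hb)
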